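-- pv_equiv track=rewrite | github.com/queelius/computational-explorations | src/set_theory_attacks.py | is_sunflower
-- ===== SOURCE A (Python) =====
-- from itertools import combinations, product as iproduct
-- from typing import Dict, FrozenSet, List, Optional, Set, Tuple
--
-- def is_sunflower(family: List[FrozenSet[int]], r: int) -> Optional[List[int]]:
--     """
--     Check if family contains a sunflower with r petals.
--
--     Returns indices of the r sunflower members if found, None otherwise.
--     """
--     if len(family) < r:
--         return None
--
--     for indices in combinations(range(len(family)), r):
--         sets = [family[i] for i in indices]
--         # Compute pairwise intersections
--         kernel = sets[0]
--         for s in sets[1:]: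
--             kernel = kernel & s
--
--         # Check: every pair intersects exactly in the kernel
--         is_sf = True
--         for i in range(len(sets)):
--             for j in range(i + 1, len(sets)):
--                 if sets[i] & sets[j] != kernel:
--                     is_sf = False
--                     break
--             if not is_sf:
--                 break
--
--         if is_sf:
--             return list(indices)
--
--     return None
-- ===== SOURCE B (Python) =====
-- from typing import FrozenSet, List, Optional
--
-- def is_sunflower(family: List[FrozenSet[int]], r: int) -> Optional[List[int]]:
--     """Recursive include/skip backtracking over indices (same lexicographic
--     order as itertools.combinations), testing each r-subset with an
--     element-frequency table instead of A's pairwise intersection scan."""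
--     n = len(family)
--     if n < r:
--         return None
--
--     def check(chosen):
--         sets = [family[i] for i in chosen]
--         kernel = sets[0]
--         for s in sets[1:]:
--             kernel = kernel & s
--         counts = {}
--         for s in sets:
--             for x in s:
--                 counts[x] = counts.get(x, 0) + 1
--         return all(c == 1 or x in kernel for x, c in counts.items())
--
--     def search(start, chosen):
--         if len(chosen) == r:
--             return list(chosen) if check(chosen) else None
--         if start >= n:
--             return None
--         res = search(start + 1, chosen + [start])
--         return res if res is not None else search(start + 1, chosen)
--
--     return search(0, [])
-- ===== Notes on version B (the rewrite author's own statement) =====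
-- stated objective: alternative
-- what changed: A's explicit loop over itertools.combinations with a quadratic pairwise intersection-equality scan is replaced by recursive include/skip backtracking over the index range (same lexicographic order) whose leaf test uses one element-frequency table: the subset is a sunflower iff every element in at least two of the r sets lies in the kernel.
import Mathlib
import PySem

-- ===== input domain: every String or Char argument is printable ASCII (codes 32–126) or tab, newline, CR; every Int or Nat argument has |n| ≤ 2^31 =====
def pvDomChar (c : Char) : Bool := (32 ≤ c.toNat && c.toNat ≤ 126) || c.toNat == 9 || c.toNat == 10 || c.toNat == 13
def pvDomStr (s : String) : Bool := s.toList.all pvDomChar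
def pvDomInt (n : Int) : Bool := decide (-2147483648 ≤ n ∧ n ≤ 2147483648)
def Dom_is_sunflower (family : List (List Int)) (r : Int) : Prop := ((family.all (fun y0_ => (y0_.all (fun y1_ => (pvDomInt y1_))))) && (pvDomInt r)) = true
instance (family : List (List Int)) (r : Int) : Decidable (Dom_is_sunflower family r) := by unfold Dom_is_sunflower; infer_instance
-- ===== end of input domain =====

-- B replaces A's itertools.combinations loop + quadratic pairwise intersection scan by
-- recursive include/skip backtracking over indices (same lexicographic order) whose leaf
-- test uses one element-frequency table (objective: alternative).

-- ===== PORT A =====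
-- loop over the remaining combinations (indices into family); for each, build the sets,
-- fold the kernel, and run the pairwise intersection check exactly as A does
def pvALoop (family : List (List Int)) : List (List Nat) → Option (List Int)
  | [] => none
  | idxs :: rest =>
    match idxs.map (fun i => PySem.Set.ofList (family.getD i [])) with
    | [] => none  -- unreachable under Pre_ (r ≥ 1): Python's sets[0] raises IndexError here
    | s0 :: tl =>
      if (List.range (s0 :: tl).length).all (fun i =>
          (List.range' (i + 1) ((s0 :: tl).length - (i + 1))).all (fun j =>
            PySem.Set.equal
              (PySem.Set.inter ((s0 :: tl).getD i []) ((s0 :: tl).getD j []))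
              (tl.foldl PySem.Set.inter s0))) then
        some (idxs.map (fun i => (i : Int)))
      else pvALoop family rest

def is_sunflower (family : List (List Int)) (r : Int) : Option (List Int) :=
  if (family.length : Int) < r then none
  else pvALoop family (PySem.List.combinations (List.range family.length) r.toNat)

-- ===== PORT B =====
-- check(chosen): kernel fold, then a frequency dict over the sets' elements
def pvCheck (family : List (List Int)) (chosen : List Nat) : Bool :=
  match chosen.map (fun i => PySem.Set.ofList (family.getD i [])) with
  | [] => false  -- unreachable under Pre_ (r ≥ 1): Python's sets[0] raises IndexError here
  | s0 :: tl =>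
    let kernel := tl.foldl PySem.Set.inter s0
    let counts := (s0 :: tl).foldl
      (fun d s => s.foldl (fun d x => d.insert x (d.getD x 0 + 1)) d)
      (PySem.Dict.empty : PySem.Dict Int Int)
    counts.items.all (fun p => p.2 == 1 || PySem.Set.contains kernel p.1)

-- search(start, chosen): include start first, then skip it (lexicographic order)
def pvSearch (family : List (List Int)) (n r : Nat) (start : Nat) (chosen : List Nat) :
    Option (List Int) :=
  if chosen.length == r then
    if pvCheck family chosen then some (chosen.map (fun i => (i : Int))) else none
  else if h : start ≥ n then none
  else
    match pvSearch family n r (start + 1) (chosen ++ [start]) with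
    | some res => some res
    | none => pvSearch family n r (start + 1) chosen
termination_by n - start

def is_sunflower_alt (family : List (List Int)) (r : Int) : Option (List Int) :=
  if (family.length : Int) < r then none
  else pvSearch family family.length r.toNat 0 []

-- ===== PRECONDITION & SPEC =====
-- Python A raises for every r ≤ 0 (ValueError from combinations for r < 0, IndexError on
-- sets[0] for r = 0), so Pre_ admits exactly r ≥ 1 — every input on which A returns.
def Pre_is_sunflower (family : List (List Int)) (r : Int) : Prop := 1 ≤ r
instance (family : List (List Int)) (r : Int) : Decidable (Pre_is_sunflower family r) := by unfold Pre_is_sunflower; infer_instance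

def pvWitness_is_sunflower : List (List Int) × Int := ([[1, 2], [1, 3]], 2)

def Spec_is_sunflower (family : List (List Int)) (r : Int) (out : Option (List Int)) : Prop := out = is_sunflower_alt family r
instance (family : List (List Int)) (r : Int) (out : Option (List Int)) : Decidable (Spec_is_sunflower family r out) := by unfold Spec_is_sunflower; infer_instance

-- ===== CLAIM (what is proved, stated in full; the proofs are below) =====
def Claim_equal_is_sunflower : Prop := ∀ (family : List (List Int)) (r : Int), Dom_is_sunflower family r → Pre_is_sunflower family r → Spec_is_sunflower family r (is_sunflower family r)

-- ===== LEMMAS AND PROOFS =====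

-- proof-only intermediate: A's combination list traversed with B's frequency check
def pvMLoop (family : List (List Int)) : List (List Nat) → Option (List Int)
  | [] => none
  | idxs :: rest =>
    if pvCheck family idxs then some (idxs.map (fun i => (i : Int)))
    else pvMLoop family rest

lemma pvMem_foldl_inter (tl : List (PySem.Set Int)) (s0 : PySem.Set Int) (x : Int) :
    x ∈ tl.foldl PySem.Set.inter s0 ↔ x ∈ s0 ∧ ∀ s ∈ tl, x ∈ s := by
  induction tl generalizing s0 with
  | nil => simp
  | cons t tl ih => simp [List.foldl_cons, ih, PySem.Set.mem_inter, and_assoc]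

lemma pvCountP_pos {α : Type} (p : α → Bool) (l : List α) :
    0 < l.countP p ↔ ∃ a ∈ l, p a = true := by
  induction l with
  | nil => simp
  | cons a l ih =>
    rw [List.countP_cons]
    by_cases h : p a = true
    · simp [h]
    · simp [h, ih]

lemma pvNodup_count (s : List Int) (h : s.Nodup) (x : Int) :
    s.count x = if x ∈ s then 1 else 0 := by
  split_ifs with hx
  · have h1 : 0 < s.count x := List.count_pos_iff.mpr hx
    have h2 : s.count x ≤ 1 := List.nodup_iff_count_le_one.mp h x
    omega
  · exact List.count_eq_zero_of_not_mem hx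

lemma pvCount_flatten_eq_countP (l : List (PySem.Set Int)) (hnd : ∀ s ∈ l, s.Nodup) (x : Int) :
    l.flatten.count x = l.countP (fun s => decide (x ∈ s)) := by
  induction l with
  | nil => simp
  | cons s tl ih =>
    simp only [List.flatten_cons, List.count_append, List.countP_cons]
    rw [ih (fun t ht => hnd t (List.mem_cons_of_mem _ ht)),
        pvNodup_count s (hnd s (List.mem_cons_self)) x]
    by_cases hx : x ∈ s <;> simp [hx] <;> omega

lemma pvPairwise_iff_two_count (K : PySem.Set Int) (l : List (PySem.Set Int)) :
    l.Pairwise (fun s t => ∀ x, x ∈ s → x ∈ t → x ∈ K) ↔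
      ∀ x : Int, 2 ≤ l.countP (fun s => decide (x ∈ s)) → x ∈ K := by
  induction l with
  | nil => simp
  | cons s tl ih =>
    rw [List.pairwise_cons, ih]
    have hcons : ∀ x : Int, (s :: tl).countP (fun u => decide (x ∈ u)) =
        tl.countP (fun u => decide (x ∈ u)) + (if x ∈ s then 1 else 0) := by
      intro x
      rw [List.countP_cons]
      by_cases hxs : x ∈ s <;> simp [hxs]
    constructor
    · rintro ⟨h1, h2⟩ x hx
      rw [hcons] at hx
      by_cases hxs : x ∈ s
      · rw [if_pos hxs] at hx
        have hpos : 0 < tl.countP (fun u => decide (x ∈ u)) := by omega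
        obtain ⟨t, ht, hxt⟩ := (pvCountP_pos _ _).mp hpos
        exact h1 t ht x hxs (by simpa using hxt)
      · rw [if_neg hxs] at hx
        exact h2 x (by omega)
    · intro h
      refine ⟨?_, ?_⟩
      · intro t ht x hxs hxt
        apply h x
        have hpos : 0 < tl.countP (fun u => decide (x ∈ u)) :=
          (pvCountP_pos _ _).mpr ⟨t, ht, by simpa using hxt⟩
        rw [hcons, if_pos hxs]
        omega
      · intro x hx
        apply h x
        by_cases hxs : x ∈ s
        · rw [hcons, if_pos hxs]; omega
        · rw [hcons, if_neg hxs]; omega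

lemma pvACheck_iff (sets : List (PySem.Set Int)) (K : PySem.Set Int)
    (hK : ∀ x ∈ K, ∀ s ∈ sets, x ∈ s) :
    ((List.range sets.length).all (fun i =>
      (List.range' (i + 1) (sets.length - (i + 1))).all (fun j =>
        PySem.Set.equal (PySem.Set.inter (sets.getD i []) (sets.getD j [])) K)) = true)
    ↔ sets.Pairwise (fun s t => ∀ x, x ∈ s → x ∈ t → x ∈ K) := by
  rw [List.pairwise_iff_getElem]
  simp only [List.all_eq_true, List.mem_range, List.mem_range'_1, PySem.Set.equal_iff,
    PySem.Set.mem_inter]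
  constructor
  · intro h i j hi hj hij x hxi hxj
    have h2 := h i hi j ⟨hij, by omega⟩ x
    rw [List.getD_eq_getElem sets [] hi, List.getD_eq_getElem sets [] hj] at h2
    exact h2.mp ⟨hxi, hxj⟩
  · intro h i hi j hj x
    have hjl : j < sets.length := by omega
    rw [List.getD_eq_getElem sets [] hi, List.getD_eq_getElem sets [] hjl]
    constructor
    · rintro ⟨hxi, hxj⟩
      exact h i j hi hjl (by omega) x hxi hxj
    · intro hxK
      exact ⟨hK x hxK _ (sets.getElem_mem hi), hK x hxK _ (sets.getElem_mem hjl)⟩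

lemma pvBCheck_iff (l : List (PySem.Set Int)) (K : PySem.Set Int) (hnd : ∀ s ∈ l, s.Nodup) :
    ((l.flatten.foldl (fun d x => d.insert x (d.getD x 0 + 1)) (PySem.Dict.empty : PySem.Dict Int Int)).items.all
        (fun p => p.2 == 1 || PySem.Set.contains K p.1) = true)
    ↔ ∀ x : Int, 2 ≤ l.countP (fun s => decide (x ∈ s)) → x ∈ K := by
  have hctr : (l.flatten.foldl (fun d x => d.insert x (d.getD x 0 + 1)) (PySem.Dict.empty : PySem.Dict Int Int))
      = PySem.Dict.counter l.flatten := rfl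
  rw [hctr, PySem.Dict.items_counter]
  simp only [List.all_map, Function.comp, List.all_eq_true, PySem.Set.mem_ofList,
    Bool.or_eq_true, beq_iff_eq, Nat.cast_eq_one, PySem.Set.contains_iff]
  constructor
  · intro h x hx
    have hx1 : 0 < l.countP (fun s => decide (x ∈ s)) := by omega
    obtain ⟨s, hs, hxs⟩ := (pvCountP_pos _ _).mp hx1
    have hmem : x ∈ l.flatten := List.mem_flatten.mpr ⟨s, hs, by simpa using hxs⟩
    have hcnt := pvCount_flatten_eq_countP l hnd x
    rcases h x hmem with h1 | h2
    · exfalso; omega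
    · exact h2
  · intro h k hk
    by_cases h2 : 2 ≤ l.countP (fun s => decide (k ∈ s))
    · exact Or.inr (h k h2)
    · left
      have hk1 : 0 < l.countP (fun s => decide (k ∈ s)) := by
        obtain ⟨s, hs, hks⟩ := List.mem_flatten.mp hk
        exact (pvCountP_pos _ _).mpr ⟨s, hs, by simpa using hks⟩
      have hcnt := pvCount_flatten_eq_countP l hnd k
      omega

-- the two per-subset tests agree
lemma pvCheck_eq_ACheck (family : List (List Int)) (idxs : List Nat)
    (s0 : PySem.Set Int) (tl : List (PySem.Set Int))
    (hs : idxs.map (fun i => PySem.Set.ofList (family.getD i [])) = s0 :: tl) :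
    ((List.range (s0 :: tl).length).all (fun i =>
      (List.range' (i + 1) ((s0 :: tl).length - (i + 1))).all (fun j =>
        PySem.Set.equal
          (PySem.Set.inter ((s0 :: tl).getD i []) ((s0 :: tl).getD j []))
          (tl.foldl PySem.Set.inter s0))))
    = pvCheck family idxs := by
  have hnd : ∀ s ∈ s0 :: tl, s.Nodup := by
    rw [← hs]
    intro s hsm
    obtain ⟨i, _, rfl⟩ := List.mem_map.mp hsm
    exact PySem.Set.nodup_ofList _
  have hK : ∀ x ∈ tl.foldl PySem.Set.inter s0, ∀ s ∈ s0 :: tl, x ∈ s := by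
    intro x hx s hsm
    rcases (pvMem_foldl_inter tl s0 x).mp hx with ⟨h0, hrest⟩
    rcases List.mem_cons.mp hsm with rfl | hs'
    · exact h0
    · exact hrest s hs'
  unfold pvCheck
  rw [hs]
  simp only [List.foldl_flatten.symm]
  rw [show ∀ (a b : Bool), (a = b) ↔ ((a = true) ↔ (b = true)) from by decide]
  rw [pvACheck_iff _ _ hK, pvBCheck_iff _ _ hnd, pvPairwise_iff_two_count]

lemma pvALoop_eq_MLoop (family : List (List Int)) (combos : List (List Nat))
    (hne : ∀ idxs ∈ combos, idxs ≠ []) :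
    pvALoop family combos = pvMLoop family combos := by
  induction combos with
  | nil => rfl
  | cons idxs rest ih0 =>
    have ih := ih0 (fun i hi => hne i (List.mem_cons_of_mem _ hi))
    cases hs : idxs.map (fun i => PySem.Set.ofList (family.getD i [])) with
    | nil =>
      exact absurd (List.map_eq_nil_iff.mp hs) (hne idxs List.mem_cons_self)
    | cons s0 tl =>
      simp only [pvALoop, pvMLoop, hs]
      rw [pvCheck_eq_ACheck family idxs s0 tl hs]
      split
      · rfl
      · exact ih

lemma pvMLoop_append (family : List (List Int)) (l1 l2 : List (List Nat)) :
    pvMLoop family (l1 ++ l2)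
      = match pvMLoop family l1 with
        | some res => some res
        | none => pvMLoop family l2 := by
  induction l1 with
  | nil => simp [pvMLoop]
  | cons idxs rest ih =>
    simp only [List.cons_append, pvMLoop]
    split
    · rfl
    · exact ih

lemma pvSearch_eq_MLoop (family : List (List Int)) (n r : Nat) :
    ∀ (d start : Nat) (chosen : List Nat), n - start = d → chosen.length ≤ r →
    pvSearch family n r start chosen
      = pvMLoop family
          ((PySem.List.combinations (List.range' start (n - start)) (r - chosen.length)).map
            (chosen ++ ·)) := by
  intro d
  induction d with
  | zero =>
    intro start chosen hd hle
    rw [pvSearch, hd]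
    by_cases heq : chosen.length = r
    · simp [heq, PySem.List.combinations_zero, pvMLoop]
    · have h1 : r - chosen.length ≠ 0 := by omega
      obtain ⟨k, hk⟩ := Nat.exists_eq_succ_of_ne_zero h1
      have hge : start ≥ n := by omega
      simp [heq, hge, hk, List.range'_zero, PySem.List.combinations_nil_succ, pvMLoop]
  | succ d ih =>
    intro start chosen hd hle
    rw [pvSearch]
    by_cases heq : chosen.length = r
    · simp [heq, PySem.List.combinations_zero, pvMLoop]
    · have hlt : start < n := by omega
      have hnge : ¬ start ≥ n := by omega
      obtain ⟨k, hk⟩ := Nat.exists_eq_succ_of_ne_zero (show r - chosen.length ≠ 0 by omega)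
      have hrange : List.range' start (n - start) = start :: List.range' (start + 1) (n - (start + 1)) := by
        have : n - start = (n - (start + 1)) + 1 := by omega
        rw [this, List.range'_succ]
      have hcomb := PySem.List.combinations_cons_succ start (List.range' (start + 1) (n - (start + 1))) k
      simp only [beq_iff_eq]
      rw [if_neg heq, dif_neg hnge]
      rw [hrange, hk, hcomb, List.map_append, List.map_map]
      have hcomp : ((chosen ++ ·) ∘ (start :: ·)) = (fun c => (chosen ++ [start]) ++ c) := by
        funext c
        simp
      rw [hcomp, pvMLoop_append]
      have ih1 := ih (start + 1) (chosen ++ [start]) (by omega) (by simp; omega)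
      have ih2 := ih (start + 1) chosen (by omega) (by omega)
      rw [List.length_append, List.length_cons, List.length_nil] at ih1
      have hk1 : r - (chosen.length + 1) = k := by omega
      rw [hk1] at ih1
      rw [ih1, ih2, hk]

-- ===== VERDICT (by name: the statement is the Claim_ definition above) =====
theorem is_sunflower_spec : Claim_equal_is_sunflower := by
  intro family r _ hpre
  have hr : (1 : Int) ≤ r := hpre
  unfold Spec_is_sunflower is_sunflower is_sunflower_alt
  split
  · rfl
  · rename_i hge
    rw [pvALoop_eq_MLoop family _ (fun idxs hi => by
        have hlen := PySem.List.length_of_mem_combinations hi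
        intro hnil
        rw [hnil] at hlen
        simp at hlen
        omega),
      pvSearch_eq_MLoop family family.length r.toNat (family.length - 0) 0 [] rfl (by simp)]
    simp [List.range_eq_range']
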